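-- pv_equiv track=rewrite | github.com/z3nth10n/OCR-tabber | src/tab_cv.py | _cluster_indices
-- ===== SOURCE A (Python) =====
-- from typing import Iterable, Sequence
--
-- def _cluster_indices(indices: Iterable[int], min_gap: int = 2) -> list[int]:
--     clusters: list[list[int]] = []
--     for idx in sorted(indices):
--         if not clusters or idx - clusters[-1][-1] > min_gap:
--             clusters.append([idx])
--         else:
--             clusters[-1].append(idx)
--     return [int(sum(cluster) / len(cluster)) for cluster in clusters]
-- ===== SOURCE B (Python) =====
-- def _cluster_indices(indices, min_gap=2):
--     # Two-pointer segment scan: find each maximal run of near elements in the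
--     # sorted list directly, then reduce each segment to its integer mean.
--     s = sorted(indices)
--     n = len(s)
--     segs = []
--     i = 0
--     while i < n:
--         j = i + 1
--         while j < n and s[j] - s[j - 1] <= min_gap:
--             j += 1
--         segs.append(s[i:j])
--         i = j
--     return [int(sum(seg) / len(seg)) for seg in segs]
-- ===== Notes on version B (the rewrite author's own statement) =====
-- stated objective: alternative
-- what changed: Replaces the grow-or-start accumulation of a list of clusters (append to clusters or mutate clusters[-1]) by a two-pointer scan over the sorted list that delimits each maximal segment of near elements with an inner advance loop and slices it out directly.
import Mathlib
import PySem

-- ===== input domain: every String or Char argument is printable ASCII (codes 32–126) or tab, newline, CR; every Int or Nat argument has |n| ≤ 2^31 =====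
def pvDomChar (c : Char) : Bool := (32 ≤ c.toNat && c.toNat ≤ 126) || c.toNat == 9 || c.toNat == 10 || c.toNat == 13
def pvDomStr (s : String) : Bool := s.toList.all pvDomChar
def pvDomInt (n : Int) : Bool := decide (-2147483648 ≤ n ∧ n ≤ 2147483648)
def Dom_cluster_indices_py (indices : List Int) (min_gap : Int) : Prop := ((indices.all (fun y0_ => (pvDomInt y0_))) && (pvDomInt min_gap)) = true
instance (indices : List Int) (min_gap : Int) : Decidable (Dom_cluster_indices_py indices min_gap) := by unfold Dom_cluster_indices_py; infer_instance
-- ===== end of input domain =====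

-- B replaces A's grow-or-start accumulation of a list of clusters by a two-pointer segment
-- scan over the sorted list (objective: alternative decomposition, same asymptotic cost).
-- Python's int(sum(c)/len(c)) is ported as PySem.Int.truncdiv (exact while |sum(c)| < 2^53).

-- ===== PORT A =====
-- loop body of A's 'for idx in sorted(indices)' (helpers stay helpers)
def pvStepA (min_gap : Int) (cls : List (List Int)) (idx : Int) : List (List Int) :=
  if cls = [] ∨ idx - PySem.List.pyGetD (PySem.List.pyGetD cls (-1) []) (-1) 0 > min_gap then
    cls ++ [[idx]]                                       -- clusters.append([idx])
  else
    cls.dropLast ++ [PySem.List.pyGetD cls (-1) [] ++ [idx]]  -- clusters[-1].append(idx)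

def cluster_indices_py (indices : List Int) (min_gap : Int) : List Int :=
  (((PySem.List.sorted indices (fun x => x) false).foldl (pvStepA min_gap) []).map
    (fun c => PySem.Int.truncdiv c.sum (c.length : Int)))

-- ===== PORT B =====
-- inner 'while j < n and s[j] - s[j-1] <= min_gap: j += 1' (accesses are in range, getD is exact)
def pvRunLen (g : Int) (s : List Int) (j : Nat) : Nat :=
  if j < s.length then
    if s.getD j 0 - s.getD (j - 1) 0 ≤ g then pvRunLen g s (j + 1) else j
  else j
termination_by s.length - j

-- the inner loop only moves j forward (needed for termination of the outer loop)
theorem pvRunLen_ge (g : Int) (s : List Int) (j : Nat) : j ≤ pvRunLen g s j := by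
  rw [pvRunLen]
  split
  · split
    · exact le_trans (Nat.le_succ j) (pvRunLen_ge g s (j + 1))
    · exact le_refl j
  · exact le_refl j
termination_by s.length - j

-- outer 'while i < n' loop collecting the segments s[i:j]
def pvOuter (g : Int) (s : List Int) (i : Nat) (segs : List (List Int)) : List (List Int) :=
  if i < s.length then
    pvOuter g s (pvRunLen g s (i + 1))
      (segs ++ [PySem.List.slice s (some (i : Int)) (some ((pvRunLen g s (i + 1) : Nat) : Int))])
  else segs
termination_by s.length - i
decreasing_by
  have := pvRunLen_ge g s (i + 1)
  omega

def cluster_indices_py_alt (indices : List Int) (min_gap : Int) : List Int :=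
  ((pvOuter min_gap (PySem.List.sorted indices (fun x => x) false) 0 []).map
    (fun seg => PySem.Int.truncdiv seg.sum (seg.length : Int)))

-- ===== PRECONDITION & SPEC =====
def Spec_cluster_indices_py (indices : List Int) (min_gap : Int) (out : List Int) : Prop := out = cluster_indices_py_alt indices min_gap
instance (indices : List Int) (min_gap : Int) (out : List Int) : Decidable (Spec_cluster_indices_py indices min_gap out) := by unfold Spec_cluster_indices_py; infer_instance

-- ===== CLAIM (what is proved, stated in full; the proofs are below) =====
def Claim_equal_cluster_indices_py : Prop := ∀ (indices : List Int) (min_gap : Int), Dom_cluster_indices_py indices min_gap → Spec_cluster_indices_py indices min_gap (cluster_indices_py indices min_gap)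

-- ===== LEMMAS AND PROOFS =====

-- proof-side middle ground: length of the chain continuing after previous value p
def pvTakeRun (g : Int) : Int → List Int → Nat
  | _, [] => 0
  | p, x :: xs => if x - p ≤ g then 1 + pvTakeRun g x xs else 0

-- recursive peel-first-segment description both ports are reduced to
def pvSplit (g : Int) : List Int → List (List Int)
  | [] => []
  | x :: xs =>
    (x :: xs.take (pvTakeRun g x xs)) :: pvSplit g (xs.drop (pvTakeRun g x xs))
termination_by xs => xs.length
decreasing_by simp

-- A's loop with the current (nonempty) cluster c made explicit, structurally
def pvGrp (g : Int) : List Int → List Int → List (List Int)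
  | c, [] => [c]
  | c, x :: xs =>
    if x - (c.getLast?.getD 0) > g then c :: pvGrp g [x] xs else pvGrp g (c ++ [x]) xs

theorem pvTakeRun_nil (g p : Int) : pvTakeRun g p [] = 0 := by rw [pvTakeRun]

theorem pvTakeRun_cons (g p x : Int) (xs : List Int) :
    pvTakeRun g p (x :: xs) = if x - p ≤ g then 1 + pvTakeRun g x xs else 0 := by
  rw [pvTakeRun]

theorem pvSplit_nil (g : Int) : pvSplit g [] = [] := by rw [pvSplit.eq_def]

theorem pvSplit_cons (g x : Int) (xs : List Int) :
    pvSplit g (x :: xs)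
      = (x :: xs.take (pvTakeRun g x xs)) :: pvSplit g (xs.drop (pvTakeRun g x xs)) := by
  rw [pvSplit.eq_def]

theorem pvGrp_nil (g : Int) (c : List Int) : pvGrp g c [] = [c] := by rw [pvGrp]

theorem pvGrp_cons (g : Int) (c : List Int) (x : Int) (xs : List Int) :
    pvGrp g c (x :: xs)
      = if x - (c.getLast?.getD 0) > g then c :: pvGrp g [x] xs else pvGrp g (c ++ [x]) xs := by
  rw [pvGrp]

-- the inner while loop computes j = start + chain length after s[start-1]
theorem pvRunLen_eq (g : Int) (s : List Int) (j : Nat) (hj : 1 ≤ j) :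
    pvRunLen g s j = j + pvTakeRun g (s.getD (j - 1) 0) (s.drop j) := by
  rw [pvRunLen]
  by_cases h : j < s.length
  · rw [if_pos h]
    have hd : s.drop j = s[j] :: s.drop (j + 1) := (List.getElem_cons_drop h).symm
    have hgd : s.getD j 0 = s[j] := List.getD_eq_getElem s 0 h
    rw [hd, pvTakeRun_cons, ← hgd]
    by_cases hc : s.getD j 0 - s.getD (j - 1) 0 ≤ g
    · rw [if_pos hc, if_pos hc, pvRunLen_eq g s (j + 1) (by omega)]
      have h1 : j + 1 - 1 = j := by omega
      rw [h1]
      omega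
    · rw [if_neg hc, if_neg hc]
      omega
  · rw [if_neg h]
    have hnil : s.drop j = [] := List.drop_eq_nil_of_le (by omega)
    rw [hnil, pvTakeRun_nil]
    omega
termination_by s.length - j

-- the outer two-pointer loop produces exactly the peel-first-segment decomposition
theorem pvOuter_eq (g : Int) (s : List Int) (i : Nat) (segs : List (List Int)) :
    pvOuter g s i segs = segs ++ pvSplit g (s.drop i) := by
  rw [pvOuter]
  by_cases h : i < s.length
  · rw [if_pos h]
    have hd : s.drop i = s[i] :: s.drop (i + 1) := (List.getElem_cons_drop h).symm
    have hgd : s.getD i 0 = s[i] := List.getD_eq_getElem s 0 h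
    have hrl : pvRunLen g s (i + 1) = (i + 1) + pvTakeRun g s[i] (s.drop (i + 1)) := by
      rw [pvRunLen_eq g s (i + 1) (by omega)]
      have h1 : i + 1 - 1 = i := by omega
      rw [h1, hgd]
    rw [pvOuter_eq g s (pvRunLen g s (i + 1))]
    have hslice : PySem.List.slice s (some (i : Int)) (some ((pvRunLen g s (i + 1) : Nat) : Int))
        = s[i] :: (s.drop (i + 1)).take (pvTakeRun g s[i] (s.drop (i + 1))) := by
      rw [PySem.List.slice_natCast, hrl]
      have h2 : (i + 1) + pvTakeRun g s[i] (s.drop (i + 1)) - i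
          = pvTakeRun g s[i] (s.drop (i + 1)) + 1 := by omega
      rw [h2, hd, List.take_succ_cons]
    have hdrop : s.drop (pvRunLen g s (i + 1))
        = (s.drop (i + 1)).drop (pvTakeRun g s[i] (s.drop (i + 1))) := by
      rw [List.drop_drop, hrl]
    rw [hslice, hdrop, hd, pvSplit_cons]
    simp
  · rw [if_neg h]
    have hnil : s.drop i = [] := List.drop_eq_nil_of_le (by omega)
    rw [hnil, pvSplit_nil, List.append_nil]
termination_by s.length - i
decreasing_by
  have := pvRunLen_ge g s (i + 1)
  omega

-- A's in-progress cluster c absorbs exactly the chain continuing its last element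
theorem pvGrp_eq (g : Int) (xs : List Int) : ∀ c : List Int, c ≠ [] →
    pvGrp g c xs = (c ++ xs.take (pvTakeRun g (c.getLast?.getD 0) xs))
      :: pvSplit g (xs.drop (pvTakeRun g (c.getLast?.getD 0) xs)) := by
  induction xs with
  | nil =>
    intro c hc
    rw [pvGrp_nil, pvTakeRun_nil]
    simp [pvSplit_nil]
  | cons x ys ih =>
    intro c hc
    rw [pvGrp_cons, pvTakeRun_cons]
    by_cases hle : x - c.getLast?.getD 0 ≤ g
    · rw [if_neg (by omega), if_pos hle]
      rw [ih (c ++ [x]) (by simp)]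
      have hlast : (c ++ [x]).getLast?.getD 0 = x := by simp
      rw [hlast]
      have h1 : 1 + pvTakeRun g x ys = pvTakeRun g x ys + 1 := by omega
      rw [h1, List.take_succ_cons, List.drop_succ_cons]
      simp
    · rw [if_pos (by omega), if_neg hle]
      rw [ih [x] (by simp)]
      have hx : ([x] : List Int).getLast?.getD 0 = x := by simp
      rw [hx, List.take_zero, List.drop_zero, List.append_nil, pvSplit_cons]
      simp

-- A's fold, started with prefix clusters pref and current cluster c, is pref ++ pvGrp
theorem pvFold_eq (g : Int) (xs : List Int) : ∀ (pref : List (List Int)) (c : List Int), c ≠ [] →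
    List.foldl (pvStepA g) (pref ++ [c]) xs = pref ++ pvGrp g c xs := by
  induction xs with
  | nil =>
    intro pref c hc
    rw [List.foldl_nil, pvGrp_nil]
  | cons x ys ih =>
    intro pref c hc
    rw [List.foldl_cons, pvGrp_cons]
    have h1 : PySem.List.pyGetD (pref ++ [c]) (-1) ([] : List Int) = c :=
      PySem.List.pyGetD_neg_one_append_singleton pref c []
    have h2 : PySem.List.pyGetD c (-1) (0 : Int) = c.getLast?.getD 0 := by
      rw [PySem.List.pyGetD_neg_one c 0 hc]
      have : c.getLast? = some (c.getLast hc) := List.getLast?_eq_some_getLast hc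
      rw [this]
      rfl
    by_cases hgt : x - c.getLast?.getD 0 > g
    · have hstep : pvStepA g (pref ++ [c]) x = (pref ++ [c]) ++ [[x]] := by
        unfold pvStepA
        rw [h1, h2, if_pos (Or.inr hgt)]
      rw [hstep, ih (pref ++ [c]) [x] (by simp), if_pos hgt]
      simp
    · have hstep : pvStepA g (pref ++ [c]) x = pref ++ [c ++ [x]] := by
        unfold pvStepA
        rw [h1, h2, if_neg (by push Not; refine ⟨by simp, ?_⟩; omega)]
        rw [List.dropLast_concat]
      rw [hstep, ih pref (c ++ [x]) (by simp), if_neg hgt]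

-- A's whole fold from [] equals the peel-first-segment decomposition
theorem pvFold_split (g : Int) (s : List Int) :
    List.foldl (pvStepA g) [] s = pvSplit g s := by
  cases s with
  | nil => rw [List.foldl_nil, pvSplit_nil]
  | cons x xs =>
    rw [List.foldl_cons]
    have hstep : pvStepA g [] x = [] ++ [[x]] := by
      unfold pvStepA
      rw [if_pos (Or.inl rfl)]
    rw [hstep, pvFold_eq g xs [] [x] (by simp), pvGrp_eq g xs [x] (by simp)]
    have hx : ([x] : List Int).getLast?.getD 0 = x := by simp
    rw [hx, pvSplit_cons]
    simp

-- ===== VERDICT (by name: the statement is the Claim_ definition above) =====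
theorem cluster_indices_py_spec : Claim_equal_cluster_indices_py := by
  intro indices min_gap _
  unfold Spec_cluster_indices_py cluster_indices_py cluster_indices_py_alt
  rw [pvFold_split, pvOuter_eq, List.drop_zero, List.nil_append]
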